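-- pv_equiv track=rewrite | github.com/A1pha3/ai-hedge-fund | scripts/analyze_btst_candidate_pool_recall_dossier.py | _build_boundary_tunable_by_lane
-- ===== SOURCE A (Python) =====
-- from typing import Any
--
-- def _build_boundary_tunable_by_lane(boundary_tunable_rows: list[dict[str, Any]]) -> dict[str, list[str]]:
--     boundary_tunable_by_lane: dict[str, list[str]] = {}
--     for row in boundary_tunable_rows:
--         lane = str(row.get("priority_handoff") or "").strip() or "unclassified_boundary_lane"
--         ticker = str(row.get("ticker") or "").strip()
--         if not ticker:
--             continue
--         lane_tickers = boundary_tunable_by_lane.setdefault(lane, [])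
--         if ticker not in lane_tickers:
--             lane_tickers.append(ticker)
--     return boundary_tunable_by_lane
-- ===== SOURCE B (Python) =====
-- def _build_boundary_tunable_by_lane(boundary_tunable_rows):
--     # Flatten to a stream of normalized (lane, ticker) pairs, dedup the pairs
--     # globally (first occurrences), then group: lanes in first-appearance order,
--     # each lane's tickers gathered by a filter over the deduped pair stream.
--     pairs = []
--     for row in boundary_tunable_rows:
--         lane = str(row.get("priority_handoff") or "").strip() or "unclassified_boundary_lane"
--         ticker = str(row.get("ticker") or "").strip()
--         if not ticker:
--             continue
--         pairs.append((lane, ticker))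
--     pairs = list(dict.fromkeys(pairs))
--     lanes = list(dict.fromkeys(lane for lane, _ in pairs))
--     return {lane: [t for l, t in pairs if l == lane] for lane in lanes}
-- ===== Notes on version B (the rewrite author's own statement) =====
-- stated objective: alternative
-- what changed: A builds the grouped dict in one pass, deduping as it goes with a membership test per row; B never groups during the scan: it flattens the rows to a stream of (lane, ticker) pairs, dedups the pairs globally with dict.fromkeys, derives the lane order from the deduped stream, and materializes each lane's list by a filter over the pair stream.
import Mathlib
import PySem

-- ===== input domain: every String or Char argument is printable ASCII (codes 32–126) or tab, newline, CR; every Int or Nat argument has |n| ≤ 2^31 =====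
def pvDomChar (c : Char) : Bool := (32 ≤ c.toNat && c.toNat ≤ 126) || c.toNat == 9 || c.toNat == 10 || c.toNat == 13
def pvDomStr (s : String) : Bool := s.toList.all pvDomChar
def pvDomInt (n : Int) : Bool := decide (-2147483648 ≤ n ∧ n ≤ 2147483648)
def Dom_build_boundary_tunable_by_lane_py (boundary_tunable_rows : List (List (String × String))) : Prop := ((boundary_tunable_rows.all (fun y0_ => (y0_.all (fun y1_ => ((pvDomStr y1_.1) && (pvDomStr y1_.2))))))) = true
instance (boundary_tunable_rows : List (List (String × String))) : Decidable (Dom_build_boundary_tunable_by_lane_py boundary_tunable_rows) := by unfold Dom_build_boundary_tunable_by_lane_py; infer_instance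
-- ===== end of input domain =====

-- B replaces A's dedup-as-you-go dict building by a flatten / global-pair-dedup /
-- group-by-filter pipeline (alternative decomposition); proved to return the same
-- dict on every input.


-- ===== PORT A =====
-- shared line of both Pythons: lane = str(row.get("priority_handoff") or "").strip() or "unclassified_boundary_lane"
def pvRowLane (row : List (String × String)) : String :=
  let s := PySem.Str.strip (((PySem.Dict.mk row).get? "priority_handoff").getD "")
  if s = "" then "unclassified_boundary_lane" else s

-- shared line of both Pythons: ticker = str(row.get("ticker") or "").strip()
def pvRowTicker (row : List (String × String)) : String :=
  PySem.Str.strip (((PySem.Dict.mk row).get? "ticker").getD "")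

-- A: one pass; setdefault the lane's list, then append the ticker only if it is
-- not already a member (dedup as you go)
def build_boundary_tunable_by_lane_py (boundary_tunable_rows : List (List (String × String))) : List (String × List String) :=
  (boundary_tunable_rows.foldl
    (fun d row =>
      let lane := pvRowLane row
      let ticker := pvRowTicker row
      if ticker = "" then d
      else
        let d1 := d.setdefault lane ([] : List String)
        let lane_tickers := d1.getD lane []
        if lane_tickers.contains ticker then d1
        else d1.insert lane (lane_tickers ++ [ticker]))
    PySem.Dict.empty).items

-- ===== PORT B =====
-- B: flatten the rows to normalized (lane, ticker) pairs, dedup the pair stream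
-- globally (dict.fromkeys = PySem.List.dedup), take the lanes in first-appearance
-- order, and build each lane's list by filtering the deduped pair stream
def build_boundary_tunable_by_lane_py_alt (boundary_tunable_rows : List (List (String × String))) : List (String × List String) :=
  let pairs := boundary_tunable_rows.foldl
    (fun acc row =>
      let lane := pvRowLane row
      let ticker := pvRowTicker row
      if ticker = "" then acc else acc ++ [(lane, ticker)])
    ([] : List (String × String))
  let q := PySem.List.dedup pairs
  let lanes := PySem.List.dedup (q.map Prod.fst)
  lanes.map (fun lane => (lane, (q.filter (fun p => p.1 == lane)).map Prod.snd))

-- ===== PRECONDITION & SPEC =====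
def Spec_build_boundary_tunable_by_lane_py (boundary_tunable_rows : List (List (String × String))) (out : List (String × List String)) : Prop := out = build_boundary_tunable_by_lane_py_alt boundary_tunable_rows
instance (boundary_tunable_rows : List (List (String × String))) (out : List (String × List String)) : Decidable (Spec_build_boundary_tunable_by_lane_py boundary_tunable_rows out) := by unfold Spec_build_boundary_tunable_by_lane_py; infer_instance

-- ===== CLAIM (what is proved, stated in full; the proofs are below) =====
def Claim_equal_build_boundary_tunable_by_lane_py : Prop := ∀ (boundary_tunable_rows : List (List (String × String))), Dom_build_boundary_tunable_by_lane_py boundary_tunable_rows → Spec_build_boundary_tunable_by_lane_py boundary_tunable_rows (build_boundary_tunable_by_lane_py boundary_tunable_rows)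

-- ===== LEMMAS AND PROOFS =====

-- A's per-pair step, factored out for the proof
def pvAstep (d : PySem.Dict String (List String)) (p : String × String) : PySem.Dict String (List String) :=
  let d1 := d.setdefault p.1 ([] : List String)
  let lane_tickers := d1.getD p.1 []
  if lane_tickers.contains p.2 then d1
  else d1.insert p.1 (lane_tickers ++ [p.2])

-- B's grouping of a deduped pair stream, as an items list
def pvOut (q : List (String × String)) : List (String × List String) :=
  (PySem.List.dedup (q.map Prod.fst)).map
    (fun lane => (lane, (q.filter (fun p => p.1 == lane)).map Prod.snd))

theorem pv_dedup_append_singleton {α : Type} [BEq α] [LawfulBEq α] (v : List α) (t : α) :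
    PySem.List.dedup (v ++ [t]) =
      if t ∈ v then PySem.List.dedup v else PySem.List.dedup v ++ [t] := by
  have h : PySem.List.dedup (v ++ [t]) = PySem.Set.add (PySem.List.dedup v) t := by
    simp [PySem.List.dedup, PySem.Set.ofList, List.foldl_append]
  rw [h, PySem.Set.add]
  by_cases hm : t ∈ v <;> simp [hm]

-- the invariant: A's fold over any pair stream produces exactly B's grouping of
-- the deduped stream
theorem pv_fold_items (ps : List (String × String)) :
    (ps.foldl pvAstep PySem.Dict.empty).items = pvOut (PySem.List.dedup ps) := by
  induction ps using List.reverseRecOn with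
  | nil => rfl
  | append_singleton ps p ih =>
    obtain ⟨lane, t⟩ := p
    rw [List.foldl_append, List.foldl_cons, List.foldl_nil]
    set d := ps.foldl pvAstep PySem.Dict.empty with hd
    -- facts about d from the IH
    have hkeys : d.keys = PySem.List.dedup ((PySem.List.dedup ps).map Prod.fst) := by
      show d.items.map Prod.fst = _
      rw [ih]; unfold pvOut; simp [Function.comp_def]
    have hnd : d.keys.Nodup := by rw [hkeys]; exact PySem.List.nodup_dedup _
    have hcont : ∀ l, d.contains l = decide (l ∈ ps.map Prod.fst) := by
      intro l
      rw [PySem.Dict.contains_eq_decide_mem_keys, hkeys]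
      simp [PySem.Set.mem_ofList, List.mem_map]
    rw [pv_dedup_append_singleton]
    by_cases hmem : (lane, t) ∈ ps
    · -- pair already seen: both sides unchanged
      simp only [hmem, if_true]
      have hq' : (lane, t) ∈ PySem.List.dedup ps := (PySem.List.mem_dedup _ _).2 hmem
      have hl : lane ∈ ps.map Prod.fst := List.mem_map.2 ⟨(lane, t), hmem, rfl⟩
      have hc : d.contains lane = true := by rw [hcont]; simp [hl]
      have ht : t ∈ ((PySem.List.dedup ps).filter (fun p => p.1 == lane)).map Prod.snd :=
        List.mem_map.2 ⟨(lane, t), List.mem_filter.2 ⟨hq', by simp⟩, rfl⟩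
      have hget : d.getD lane [] =
          ((PySem.List.dedup ps).filter (fun p => p.1 == lane)).map Prod.snd := by
        refine PySem.Dict.getD_of_mem_items d ?_ hnd []
        rw [ih]
        exact List.mem_map.2 ⟨lane,
          (PySem.List.mem_dedup _ _).2 (List.mem_map.2 ⟨(lane, t), hq', rfl⟩), rfl⟩
      simp only [pvAstep, PySem.Dict.setdefault_of_contains _ _ hc, hget]
      rw [if_pos (by simpa using ht)]
      exact ih
    · simp only [hmem, if_false]
      have hqnot : (lane, t) ∉ PySem.List.dedup ps := fun h =>
        hmem ((PySem.List.mem_dedup _ _).1 h)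
      by_cases hl : lane ∈ ps.map Prod.fst
      · -- new pair, known lane: lane's list gains t at the end
        have hc : d.contains lane = true := by rw [hcont]; simp [hl]
        have hlq : lane ∈ (PySem.List.dedup ps).map Prod.fst := by
          obtain ⟨p', hp', hfst⟩ := List.mem_map.1 hl
          exact List.mem_map.2 ⟨p', (PySem.List.mem_dedup _ _).2 hp', hfst⟩
        have hget : d.getD lane [] =
            ((PySem.List.dedup ps).filter (fun p => p.1 == lane)).map Prod.snd := by
          refine PySem.Dict.getD_of_mem_items d ?_ hnd []
          rw [ih]
          exact List.mem_map.2 ⟨lane, (PySem.List.mem_dedup _ _).2 hlq, rfl⟩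
        have ht : t ∉ ((PySem.List.dedup ps).filter (fun p => p.1 == lane)).map Prod.snd := by
          intro hmem'
          obtain ⟨p', hp', hsnd⟩ := List.mem_map.1 hmem'
          obtain ⟨hpq, hfst⟩ := List.mem_filter.1 hp'
          have : p' = (lane, t) := by
            obtain ⟨a, b⟩ := p'
            simp at hfst hsnd; simp [hfst, hsnd]
          exact hqnot (this ▸ hpq)
        simp only [pvAstep, PySem.Dict.setdefault_of_contains _ _ hc, hget]
        rw [if_neg (by simpa using ht)]
        rw [PySem.Dict.items_insert_of_contains _ _ hc, ih]
        -- lanes unchanged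
        have hlanes : PySem.List.dedup ((PySem.List.dedup ps ++ [(lane, t)]).map Prod.fst)
            = PySem.List.dedup ((PySem.List.dedup ps).map Prod.fst) := by
          rw [List.map_append, List.map_singleton, pv_dedup_append_singleton, if_pos hlq]
        simp only [pvOut, hlanes, List.map_map]
        apply List.map_congr_left
        intro l _
        by_cases hll : l = lane
        · subst hll
          simp [List.filter_append]
        · have hne : ¬ ((l : String) == lane) = true := by simp [hll]
          have hne' : ¬ ((lane : String) == l) = true := by simp [Ne.symm hll]
          simp [hll, List.filter_append, hne']
      · -- new lane: a fresh entry (lane, [t]) is appended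
        have hc : d.contains lane = false := by rw [hcont]; simp [hl]
        have hlq : lane ∉ (PySem.List.dedup ps).map Prod.fst := by
          intro h
          obtain ⟨p', hp', hfst⟩ := List.mem_map.1 h
          exact hl (List.mem_map.2 ⟨p', (PySem.List.mem_dedup _ _).1 hp', hfst⟩)
        simp only [pvAstep, PySem.Dict.setdefault_of_not_contains _ _ hc]
        rw [PySem.Dict.getD_insert_self]
        simp only [List.contains_nil, List.nil_append, if_neg Bool.false_ne_true]
        rw [PySem.Dict.insert_insert_self,
          PySem.Dict.items_insert_of_not_contains _ _ hc, ih]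
        simp only [pvOut, List.map_append, List.map_singleton]
        rw [pv_dedup_append_singleton, if_neg hlq, List.map_append, List.map_singleton]
        congr 1
        · apply List.map_congr_left
          intro l hlmem
          have hlne : l ≠ lane := by
            intro h; subst h
            exact hlq ((PySem.List.mem_dedup _ _).1 hlmem)
          have hne' : ¬ ((lane : String) == l) = true := by simp [Ne.symm hlne]
          simp [List.filter_append, hne']
        · simp [List.filter_append]
          intro a b hab h
          exact hl (List.mem_map.2 ⟨(a, b), hab, h⟩)

-- any row loop that skips empty tickers and otherwise consumes the (lane, ticker)
-- pair equals the fold of the flattened pair stream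
theorem pv_rows_to_pairs {σ : Type} (g : σ → (String × String) → σ)
    (rows : List (List (String × String))) (s : σ) :
    rows.foldl
      (fun s row =>
        let lane := pvRowLane row
        let ticker := pvRowTicker row
        if ticker = "" then s else g s (lane, ticker)) s
    = (rows.foldl
        (fun acc row =>
          let lane := pvRowLane row
          let ticker := pvRowTicker row
          if ticker = "" then acc else acc ++ [(lane, ticker)])
        ([] : List (String × String))).foldl g s := by
  have hflat : ∀ (acc : List (String × String)),
      rows.foldl
        (fun acc row =>
          let lane := pvRowLane row
          let ticker := pvRowTicker row
          if ticker = "" then acc else acc ++ [(lane, ticker)]) acc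
      = acc ++ rows.flatMap
          (fun row => if pvRowTicker row = "" then [] else [(pvRowLane row, pvRowTicker row)]) := by
    intro acc
    have hstep : (fun (acc : List (String × String)) row =>
        let lane := pvRowLane row
        let ticker := pvRowTicker row
        if ticker = "" then acc else acc ++ [(lane, ticker)])
      = (fun acc row => acc ++ (if pvRowTicker row = "" then [] else [(pvRowLane row, pvRowTicker row)])) := by
      funext acc row
      by_cases h : pvRowTicker row = "" <;> simp [h]
    rw [hstep, PySem.List.foldl_append_eq_flatMap]
  rw [hflat]
  simp only [List.nil_append]
  clear hflat
  induction rows generalizing s with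
  | nil => rfl
  | cons r rest ih =>
    simp only [List.foldl_cons, List.flatMap_cons, List.foldl_append]
    by_cases h : pvRowTicker r = "" <;> simp [h, ih]

-- ===== VERDICT (by name: the statement is the Claim_ definition above) =====
theorem build_boundary_tunable_by_lane_py_spec : Claim_equal_build_boundary_tunable_by_lane_py := by
  intro rows _
  unfold Spec_build_boundary_tunable_by_lane_py
  show (rows.foldl
      (fun d row =>
        let lane := pvRowLane row
        let ticker := pvRowTicker row
        if ticker = "" then d else pvAstep d (lane, ticker))
      PySem.Dict.empty).items = build_boundary_tunable_by_lane_py_alt rows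
  rw [pv_rows_to_pairs pvAstep rows PySem.Dict.empty, pv_fold_items]
  rfl
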